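-- pv_equiv track=rewrite | github.com/ayannshh/finance-credit-followup-agent | src/llm_generator.py | build_fallback_email
-- ===== SOURCE A (Python) =====
-- def extract_value(prompt, field_name):
--     for line in prompt.splitlines():
--         if line.startswith(f"{field_name}:"):
--             return line.split(":", 1)[1].strip()
--     return ""
--
-- def build_fallback_email(prompt):
--     """
--     Generate professional stage-specific payment follow-up emails.
--     """
--     client_name = extract_value(prompt, "Client Name")
--     invoice_no = extract_value(prompt, "Invoice Number")
--     amount = extract_value(prompt, "Amount Due")
--     due_date = extract_value(prompt, "Due Date")
--     days_overdue = extract_value(prompt, "Days Overdue")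
--
--     # Extract tone from prompt
--     tone = ""
--     for line in prompt.splitlines():
--         if line.startswith("- Use a "):
--             tone = line.replace("- Use a ", "").replace(" tone.", "").strip()
--             break
--
--     # Stage 1 — Warm & Friendly
--     if tone == "Warm & Friendly":
--         return f"""
-- Subject: Quick Reminder – Invoice {invoice_no} | {amount} Due
--
-- Hi {client_name},
--
-- I hope you're doing well.
--
-- This is a friendly reminder that Invoice {invoice_no} for {amount} was due on {due_date} and is currently {days_overdue} days overdue.
--
-- If you have already processed the payment, please disregard this message. Otherwise, we would appreciate it if you could arrange payment at your earliest convenience.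
--
-- Thank you for your continued partnership.
--
-- Best regards,
-- Accounts Receivable Team
-- """
--
--     # Stage 2 — Polite but Firm
--     if tone == "Polite but Firm":
--         return f"""
-- Subject: Payment Reminder – Invoice {invoice_no} ({days_overdue} Days Overdue)
--
-- Dear {client_name},
--
-- This is a reminder that Invoice {invoice_no} for {amount}, due on {due_date}, remains unpaid and is now {days_overdue} days overdue.
--
-- We kindly request that you process the payment as soon as possible. If payment has already been initiated, please share the expected settlement date for our records.
--
-- Thank you for your prompt attention to this matter.
--
-- Best regards,
-- Accounts Receivable Team
-- """
--
--     # Stage 3 — Formal & Serious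
--     if tone == "Formal & Serious":
--         return f"""
-- Subject: IMPORTANT: Outstanding Payment – Invoice {invoice_no} ({days_overdue} Days Overdue)
--
-- Dear {client_name},
--
-- Despite our previous reminders, Invoice {invoice_no} for {amount}, due on {due_date}, remains unpaid and is now {days_overdue} days overdue.
--
-- We request your immediate attention to this matter. Continued non-payment may affect your credit terms and future business arrangements.
--
-- Please arrange payment promptly and respond within 48 hours with either confirmation of payment or the expected payment date.
--
-- If there are any discrepancies or concerns regarding this invoice, please inform us immediately.
--
-- Sincerely,
-- Accounts Receivable Team
-- Finance Department
-- """
--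
--     # Stage 4 — Stern & Urgent
--     return f"""
-- Subject: FINAL NOTICE – Invoice {invoice_no} – Immediate Action Required
--
-- Dear {client_name},
--
-- This is our final reminder regarding Invoice {invoice_no} for {amount}, originally due on {due_date}. The invoice is now {days_overdue} days overdue.
--
-- Failure to remit payment within 24 hours may result in escalation to our legal and recovery team and may impact your account standing.
--
-- Please arrange immediate payment and provide confirmation today.
--
-- Regards,
-- Accounts Receivable Team
-- Finance Department
-- """
-- ===== SOURCE B (Python) =====
-- def _stage1(client_name, invoice_no, amount, due_date, days_overdue):
--     return f"""
-- Subject: Quick Reminder – Invoice {invoice_no} | {amount} Due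
--
-- Hi {client_name},
--
-- I hope you're doing well.
--
-- This is a friendly reminder that Invoice {invoice_no} for {amount} was due on {due_date} and is currently {days_overdue} days overdue.
--
-- If you have already processed the payment, please disregard this message. Otherwise, we would appreciate it if you could arrange payment at your earliest convenience.
--
-- Thank you for your continued partnership.
--
-- Best regards,
-- Accounts Receivable Team
-- """
--
--
-- def _stage2(client_name, invoice_no, amount, due_date, days_overdue):
--     return f"""
-- Subject: Payment Reminder – Invoice {invoice_no} ({days_overdue} Days Overdue)
--
-- Dear {client_name},
--
-- This is a reminder that Invoice {invoice_no} for {amount}, due on {due_date}, remains unpaid and is now {days_overdue} days overdue.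
--
-- We kindly request that you process the payment as soon as possible. If payment has already been initiated, please share the expected settlement date for our records.
--
-- Thank you for your prompt attention to this matter.
--
-- Best regards,
-- Accounts Receivable Team
-- """
--
--
-- def _stage3(client_name, invoice_no, amount, due_date, days_overdue):
--     return f"""
-- Subject: IMPORTANT: Outstanding Payment – Invoice {invoice_no} ({days_overdue} Days Overdue)
--
-- Dear {client_name},
--
-- Despite our previous reminders, Invoice {invoice_no} for {amount}, due on {due_date}, remains unpaid and is now {days_overdue} days overdue.
--
-- We request your immediate attention to this matter. Continued non-payment may affect your credit terms and future business arrangements.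
--
-- Please arrange payment promptly and respond within 48 hours with either confirmation of payment or the expected payment date.
--
-- If there are any discrepancies or concerns regarding this invoice, please inform us immediately.
--
-- Sincerely,
-- Accounts Receivable Team
-- Finance Department
-- """
--
--
-- def _stage4(client_name, invoice_no, amount, due_date, days_overdue):
--     return f"""
-- Subject: FINAL NOTICE – Invoice {invoice_no} – Immediate Action Required
--
-- Dear {client_name},
--
-- This is our final reminder regarding Invoice {invoice_no} for {amount}, originally due on {due_date}. The invoice is now {days_overdue} days overdue.
--
-- Failure to remit payment within 24 hours may result in escalation to our legal and recovery team and may impact your account standing.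
--
-- Please arrange immediate payment and provide confirmation today.
--
-- Regards,
-- Accounts Receivable Team
-- Finance Department
-- """
--
--
-- _DISPATCH = {
--     "Warm & Friendly": _stage1,
--     "Polite but Firm": _stage2,
--     "Formal & Serious": _stage3,
-- }
--
--
-- def build_fallback_email(prompt):
--     # single pass over the prompt: keep the first occurrence of each field and of the tone line
--     client = invoice = amount = due = overdue = tone = None
--     for line in prompt.splitlines():
--         if client is None and line.startswith("Client Name:"):
--             client = line.split(":", 1)[1].strip()
--         if invoice is None and line.startswith("Invoice Number:"):
--             invoice = line.split(":", 1)[1].strip()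
--         if amount is None and line.startswith("Amount Due:"):
--             amount = line.split(":", 1)[1].strip()
--         if due is None and line.startswith("Due Date:"):
--             due = line.split(":", 1)[1].strip()
--         if overdue is None and line.startswith("Days Overdue:"):
--             overdue = line.split(":", 1)[1].strip()
--         if tone is None and line.startswith("- Use a "):
--             tone = line.replace("- Use a ", "").replace(" tone.", "").strip()
--     template = _DISPATCH.get(tone if tone is not None else "", _stage4)
--     return template(client or "", invoice or "", amount or "", due or "", overdue or "")
-- ===== Notes on version B (the rewrite author's own statement) =====
-- stated objective: alternative
-- what changed: B parses the prompt in a single pass with first-match accumulators for the five fields and the tone (instead of A's six separate full scans via extract_value and the tone loop) and selects the stage template by dict dispatch with stage 4 as default instead of an if-chain.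
import Mathlib
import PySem

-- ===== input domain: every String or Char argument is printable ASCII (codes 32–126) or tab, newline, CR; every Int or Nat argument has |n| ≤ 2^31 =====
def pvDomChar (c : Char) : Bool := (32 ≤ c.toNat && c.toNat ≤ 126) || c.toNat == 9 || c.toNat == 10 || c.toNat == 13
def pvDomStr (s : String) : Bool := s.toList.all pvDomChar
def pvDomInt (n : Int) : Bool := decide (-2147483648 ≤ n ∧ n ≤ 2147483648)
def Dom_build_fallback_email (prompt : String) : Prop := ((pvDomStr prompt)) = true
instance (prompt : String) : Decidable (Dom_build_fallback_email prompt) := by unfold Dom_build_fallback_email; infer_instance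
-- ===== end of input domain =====

-- B replaces A's six independent scans of the prompt (five extract_value calls plus the tone loop)
-- by a single pass keeping first-match accumulators, and the tone if-chain by a dict dispatch (objective: alternative).

-- Shared template texts (the literal f-string bodies of A, used by both ports)
def pvStage1 (c i a d o : String) : String :=
  "\nSubject: Quick Reminder – Invoice " ++ i ++ " | " ++ a ++ " Due\n\nHi " ++ c ++ ",\n\nI hope you're doing well.\n\nThis is a friendly reminder that Invoice " ++ i ++ " for " ++ a ++ " was due on " ++ d ++ " and is currently " ++ o ++ " days overdue.\n\nIf you have already processed the payment, please disregard this message. Otherwise, we would appreciate it if you could arrange payment at your earliest convenience.\n\nThank you for your continued partnership.\n\nBest regards,\nAccounts Receivable Team\n"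

def pvStage2 (c i a d o : String) : String :=
  "\nSubject: Payment Reminder – Invoice " ++ i ++ " (" ++ o ++ " Days Overdue)\n\nDear " ++ c ++ ",\n\nThis is a reminder that Invoice " ++ i ++ " for " ++ a ++ ", due on " ++ d ++ ", remains unpaid and is now " ++ o ++ " days overdue.\n\nWe kindly request that you process the payment as soon as possible. If payment has already been initiated, please share the expected settlement date for our records.\n\nThank you for your prompt attention to this matter.\n\nBest regards,\nAccounts Receivable Team\n"

def pvStage3 (c i a d o : String) : String :=
  "\nSubject: IMPORTANT: Outstanding Payment – Invoice " ++ i ++ " (" ++ o ++ " Days Overdue)\n\nDear " ++ c ++ ",\n\nDespite our previous reminders, Invoice " ++ i ++ " for " ++ a ++ ", due on " ++ d ++ ", remains unpaid and is now " ++ o ++ " days overdue.\n\nWe request your immediate attention to this matter. Continued non-payment may affect your credit terms and future business arrangements.\n\nPlease arrange payment promptly and respond within 48 hours with either confirmation of payment or the expected payment date.\n\nIf there are any discrepancies or concerns regarding this invoice, please inform us immediately.\n\nSincerely,\nAccounts Receivable Team\nFinance Department\n"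

def pvStage4 (c i a d o : String) : String :=
  "\nSubject: FINAL NOTICE – Invoice " ++ i ++ " – Immediate Action Required\n\nDear " ++ c ++ ",\n\nThis is our final reminder regarding Invoice " ++ i ++ " for " ++ a ++ ", originally due on " ++ d ++ ". The invoice is now " ++ o ++ " days overdue.\n\nFailure to remit payment within 24 hours may result in escalation to our legal and recovery team and may impact your account standing.\n\nPlease arrange immediate payment and provide confirmation today.\n\nRegards,\nAccounts Receivable Team\nFinance Department\n"

-- ===== PORT A =====
-- line.split(":", 1)[1].strip() — sep ":" ≠ "" so splitMax? is some, and when the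
-- startswith guard held the split has a second part, so the pyGetD default is never used
def pvFieldVal (line : String) : String :=
  PySem.Str.strip (PySem.List.pyGetD ((PySem.Str.splitMax? line ":" 1).getD []) 1 "")

def pvToneVal (line : String) : String :=
  PySem.Str.strip (PySem.Str.replace (PySem.Str.replace line "- Use a " "") " tone." "")

def extractGo (field : String) : List String → String
  | [] => ""
  | l :: ls => if PySem.Str.startswith l (field ++ ":") then pvFieldVal l else extractGo field ls

def extract_value (prompt field : String) : String :=
  extractGo field (PySem.Str.splitlines prompt)

-- the tone loop of A (tone = "" before the loop; break at the first match)
def toneGo : List String → String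
  | [] => ""
  | l :: ls => if PySem.Str.startswith l "- Use a " then pvToneVal l else toneGo ls

def build_fallback_email (prompt : String) : String :=
  let client_name := extract_value prompt "Client Name"
  let invoice_no := extract_value prompt "Invoice Number"
  let amount := extract_value prompt "Amount Due"
  let due_date := extract_value prompt "Due Date"
  let days_overdue := extract_value prompt "Days Overdue"
  let tone := toneGo (PySem.Str.splitlines prompt)
  if tone = "Warm & Friendly" then pvStage1 client_name invoice_no amount due_date days_overdue
  else if tone = "Polite but Firm" then pvStage2 client_name invoice_no amount due_date days_overdue
  else if tone = "Formal & Serious" then pvStage3 client_name invoice_no amount due_date days_overdue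
  else pvStage4 client_name invoice_no amount due_date days_overdue

-- ===== PORT B =====
-- 'if x is None and line.startswith(pre): x = val(line)'
def pvStep (field : String) (acc : Option String) (l : String) : Option String :=
  if acc.isNone && PySem.Str.startswith l (field ++ ":") then some (pvFieldVal l) else acc

def pvToneStep (acc : Option String) (l : String) : Option String :=
  if acc.isNone && PySem.Str.startswith l "- Use a " then some (pvToneVal l) else acc

def pvDispatch : PySem.Dict String (String → String → String → String → String → String) :=
  PySem.Dict.mk [("Warm & Friendly", pvStage1), ("Polite but Firm", pvStage2), ("Formal & Serious", pvStage3)]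

def build_fallback_email_alt (prompt : String) : String :=
  let st := (PySem.Str.splitlines prompt).foldl
    (fun st l => (pvStep "Client Name" st.1 l, pvStep "Invoice Number" st.2.1 l,
      pvStep "Amount Due" st.2.2.1 l, pvStep "Due Date" st.2.2.2.1 l,
      pvStep "Days Overdue" st.2.2.2.2.1 l, pvToneStep st.2.2.2.2.2 l))
    (none, none, none, none, none, none)
  let tone := st.2.2.2.2.2.getD ""
  (pvDispatch.getD tone pvStage4) (st.1.getD "") (st.2.1.getD "") (st.2.2.1.getD "")
    (st.2.2.2.1.getD "") (st.2.2.2.2.1.getD "")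

-- ===== PRECONDITION & SPEC =====
def Spec_build_fallback_email (prompt : String) (out : String) : Prop := out = build_fallback_email_alt prompt
instance (prompt : String) (out : String) : Decidable (Spec_build_fallback_email prompt out) := by unfold Spec_build_fallback_email; infer_instance

-- ===== CLAIM (what is proved, stated in full; the proofs are below) =====
def Claim_equal_build_fallback_email : Prop := ∀ (prompt : String), Dom_build_fallback_email prompt → Spec_build_fallback_email prompt (build_fallback_email prompt)

-- ===== LEMMAS AND PROOFS =====

theorem pvStep_some (field v : String) (lines : List String) :
    lines.foldl (pvStep field) (some v) = some v := by
  induction lines with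
  | nil => rfl
  | cons l ls ih => simpa [pvStep] using ih

theorem pvToneStep_some (v : String) (lines : List String) :
    lines.foldl pvToneStep (some v) = some v := by
  induction lines with
  | nil => rfl
  | cons l ls ih => simpa [pvToneStep] using ih

theorem extractGo_eq (field : String) (lines : List String) :
    extractGo field lines = (lines.foldl (pvStep field) none).getD "" := by
  induction lines with
  | nil => rfl
  | cons l ls ih =>
    simp only [extractGo, List.foldl_cons, pvStep, Option.isNone_none, Bool.true_and]
    split_ifs with h
    · simp [pvStep_some]
    · exact ih

theorem toneGo_eq (lines : List String) :
    toneGo lines = (lines.foldl pvToneStep none).getD "" := by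
  induction lines with
  | nil => rfl
  | cons l ls ih =>
    simp only [toneGo, List.foldl_cons, pvToneStep, Option.isNone_none, Bool.true_and]
    split_ifs with h
    · simp [pvToneStep_some]
    · exact ih

-- ===== VERDICT (by name: the statement is the Claim_ definition above) =====
theorem build_fallback_email_spec : Claim_equal_build_fallback_email := by
  intro prompt _
  show build_fallback_email prompt = build_fallback_email_alt prompt
  unfold build_fallback_email build_fallback_email_alt
  rw [PySem.List.foldl_prod_mk (f := pvStep "Client Name")
        (g := fun st l => (pvStep "Invoice Number" st.1 l, pvStep "Amount Due" st.2.1 l,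
          pvStep "Due Date" st.2.2.1 l, pvStep "Days Overdue" st.2.2.2.1 l, pvToneStep st.2.2.2.2 l)),
      PySem.List.foldl_prod_mk (f := pvStep "Invoice Number")
        (g := fun st l => (pvStep "Amount Due" st.1 l, pvStep "Due Date" st.2.1 l,
          pvStep "Days Overdue" st.2.2.1 l, pvToneStep st.2.2.2 l)),
      PySem.List.foldl_prod_mk (f := pvStep "Amount Due")
        (g := fun st l => (pvStep "Due Date" st.1 l, pvStep "Days Overdue" st.2.1 l, pvToneStep st.2.2 l)),
      PySem.List.foldl_prod_mk (f := pvStep "Due Date")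
        (g := fun st l => (pvStep "Days Overdue" st.1 l, pvToneStep st.2 l)),
      PySem.List.foldl_prod_mk (f := pvStep "Days Overdue") (g := pvToneStep)]
  simp only [extract_value, extractGo_eq, toneGo_eq]
  set tone := ((PySem.Str.splitlines prompt).foldl pvToneStep none).getD "" with htone
  by_cases h1 : tone = "Warm & Friendly"
  · simp [pvDispatch, PySem.Dict.getD_eq_get?_getD, PySem.Dict.get?_mk_cons, h1]
  · by_cases h2 : tone = "Polite but Firm"
    · simp [pvDispatch, PySem.Dict.getD_eq_get?_getD, PySem.Dict.get?_mk_cons, h2]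
    · by_cases h3 : tone = "Formal & Serious"
      · simp [pvDispatch, PySem.Dict.getD_eq_get?_getD, PySem.Dict.get?_mk_cons, h3]
      · simp [pvDispatch, PySem.Dict.getD_eq_get?_getD, PySem.Dict.get?, h1, h2, h3,
          Ne.symm h1, Ne.symm h2, Ne.symm h3]
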